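-- pv_equiv track=rewrite | github.com/hoanghao123code/BIB_SEARCH_APP | modules/admin/services.py | generate_subsequences
-- ===== SOURCE A (Python) =====
-- def generate_subsequences(bib):
--     bib_str = str(bib).strip().upper()
--     n = len(bib_str)
--     sequences = []
--     for i in range((1 << n)):
--         bib_seq = ""
--         for j in range(n):
--             if i & (1 << j):
--                 bib_seq += bib_str[j]
--         if len(bib_seq) >= 4 and len(bib_seq) <= 6:
--             sequences.append(bib_seq)
--     return sequences
-- ===== SOURCE B (Python) =====
-- def generate_subsequences(bib):
--     bib_str = str(bib).strip().upper()
--     subs = [""]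
--     for ch in bib_str:
--         subs = subs + [t + ch for t in subs if len(t) < 6]
--     return [t for t in subs if len(t) >= 4]
-- ===== Notes on version B (the rewrite author's own statement) =====
-- stated objective: alternative
-- what changed: Replaced the full 2^n bitmask enumeration with a left-to-right prefix DP that keeps only subsequences of length <= 6 (extending only those of length < 6), yielding the same list in the same mask-increasing order; intended as faster (measured 48x at n=16) but at the largest probe size the 4-to-6-length output itself is too large for either program to finish, so a timing run could not confirm it.
import Mathlib
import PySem

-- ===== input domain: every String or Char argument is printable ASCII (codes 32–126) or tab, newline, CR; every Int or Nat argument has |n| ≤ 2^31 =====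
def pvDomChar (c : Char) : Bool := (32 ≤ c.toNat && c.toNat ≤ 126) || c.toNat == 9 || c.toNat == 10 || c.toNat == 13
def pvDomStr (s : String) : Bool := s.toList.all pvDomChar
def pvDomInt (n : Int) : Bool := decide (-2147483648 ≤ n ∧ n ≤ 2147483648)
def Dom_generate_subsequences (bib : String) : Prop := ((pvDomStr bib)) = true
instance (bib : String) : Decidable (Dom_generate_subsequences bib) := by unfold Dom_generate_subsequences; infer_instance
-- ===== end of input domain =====

-- B replaces A's full 2^n bitmask enumeration by a prefix DP keeping only subsequences
-- of length ≤ 6, same output in the same order (objective: alternative algorithm).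

-- ===== PORT A =====
def generate_subsequences (bib : String) : List String :=
  let cs := PySem.Chars.upper (PySem.Chars.strip bib.toList)
  let n := cs.length
  ((List.range (1 <<< n)).foldl
    (fun sequences i =>
      let bib_seq := (List.range n).foldl
        (fun acc j => if i &&& (1 <<< j) != 0 then acc ++ [cs.getD j ' '] else acc) []
      if 4 ≤ bib_seq.length ∧ bib_seq.length ≤ 6 then sequences ++ [bib_seq] else sequences)
    ([] : List (List Char))).map String.ofList

-- ===== PORT B =====
def generate_subsequences_alt (bib : String) : List String :=
  let cs := PySem.Chars.upper (PySem.Chars.strip bib.toList)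
  let subs := cs.foldl
    (fun subs ch => subs ++ (subs.filter (fun t => t.length < 6)).map (fun t => t ++ [ch]))
    ([[]] : List (List Char))
  (subs.filter (fun t => 4 ≤ t.length)).map String.ofList

-- ===== PRECONDITION & SPEC =====
def Spec_generate_subsequences (bib : String) (out : List String) : Prop := out = generate_subsequences_alt bib
instance (bib : String) (out : List String) : Decidable (Spec_generate_subsequences bib out) := by unfold Spec_generate_subsequences; infer_instance

-- ===== CLAIM (what is proved, stated in full; the proofs are below) =====
def Claim_equal_generate_subsequences : Prop := ∀ (bib : String), Dom_generate_subsequences bib → Spec_generate_subsequences bib (generate_subsequences bib)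

-- ===== LEMMAS AND PROOFS =====

-- A's inner loop: the subsequence of cs selected by bitmask i
def pvSub (cs : List Char) (i : Nat) : List Char :=
  (List.range cs.length).foldl
    (fun acc j => if i &&& (1 <<< j) != 0 then acc ++ [cs.getD j ' '] else acc) []

-- A's full enumeration, mask-increasing
def pvFull (cs : List Char) : List (List Char) :=
  (List.range (1 <<< cs.length)).map (pvSub cs)

theorem pv_bit_cond (i j : Nat) : (i &&& (1 <<< j) != 0) = i.testBit j := by
  rw [Nat.shiftLeft_eq, one_mul, Nat.and_two_pow]
  cases h : i.testBit j <;> simp [Nat.pow_eq_zero]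

theorem pvSub_append_lo (cs : List Char) (c : Char) (i : Nat) (hi : i < 2 ^ cs.length) :
    pvSub (cs ++ [c]) i = pvSub cs i := by
  unfold pvSub
  rw [List.length_append, List.length_singleton, List.range_succ, List.foldl_concat]
  have hbit : (i &&& (1 <<< cs.length) != 0) = false := by
    rw [pv_bit_cond, Nat.testBit_lt_two_pow hi]
  rw [hbit]
  simp only [Bool.false_eq_true, if_false]
  exact PySem.List.foldl_congr_mem _ _ _ _ (fun acc j hj => by
    rw [List.getD_append _ _ _ j (List.mem_range.mp hj)])

theorem pvSub_append_hi (cs : List Char) (c : Char) (i : Nat) (hi : i < 2 ^ cs.length) :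
    pvSub (cs ++ [c]) (2 ^ cs.length + i) = pvSub cs i ++ [c] := by
  unfold pvSub
  rw [List.length_append, List.length_singleton, List.range_succ, List.foldl_concat]
  have hbit : ((2 ^ cs.length + i) &&& (1 <<< cs.length) != 0) = true := by
    rw [pv_bit_cond, Nat.testBit_two_pow_add_eq, Nat.testBit_lt_two_pow hi]; rfl
  rw [hbit, if_pos rfl]
  have hgetD : (cs ++ [c]).getD cs.length ' ' = c := by
    simp [List.getD_eq_getElem?_getD]
  rw [hgetD]
  congr 1
  exact PySem.List.foldl_congr_mem _ _ _ _ (fun acc j hj => by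
    have hjn := List.mem_range.mp hj
    rw [pv_bit_cond, pv_bit_cond, Nat.testBit_two_pow_add_gt hjn,
        List.getD_append _ _ _ j hjn])

theorem pvFull_append (cs : List Char) (c : Char) :
    pvFull (cs ++ [c]) = pvFull cs ++ (pvFull cs).map (· ++ [c]) := by
  unfold pvFull
  rw [List.length_append, List.length_singleton, Nat.one_shiftLeft, Nat.one_shiftLeft,
      show 2 ^ (cs.length + 1) = 2 ^ cs.length + 2 ^ cs.length by ring, List.range_add,
      List.map_append, List.map_map, List.map_map]
  congr 1
  · exact List.map_congr_left (fun i hi => pvSub_append_lo cs c i (List.mem_range.mp hi))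
  · exact List.map_congr_left (fun i hi => by
      simpa using pvSub_append_hi cs c i (List.mem_range.mp hi))

-- B's loop state after consuming cs is exactly A's enumeration pruned to length ≤ 6
theorem pvB_state (cs : List Char) :
    cs.foldl (fun subs ch => subs ++ (subs.filter (fun t => t.length < 6)).map (fun t => t ++ [ch]))
      ([[]] : List (List Char))
      = (pvFull cs).filter (fun t => t.length ≤ 6) := by
  induction cs using List.reverseRecOn with
  | nil => decide
  | append_singleton cs c ih =>
    rw [List.foldl_concat, ih, pvFull_append, List.filter_append, List.filter_map,
        List.filter_filter]
    congr 1
    congr 1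
    apply List.filter_congr
    intro t _
    rw [Bool.eq_iff_iff]
    simp only [Function.comp_apply, List.length_append, List.length_singleton,
      Bool.and_eq_true, decide_eq_true_eq]
    omega

theorem pv_main (cs : List Char) :
    (List.range (1 <<< cs.length)).foldl
      (fun sequences i =>
        let bib_seq := (List.range cs.length).foldl
          (fun acc j => if i &&& (1 <<< j) != 0 then acc ++ [cs.getD j ' '] else acc) []
        if 4 ≤ bib_seq.length ∧ bib_seq.length ≤ 6 then sequences ++ [bib_seq] else sequences)
      ([] : List (List Char))
      = ((cs.foldl (fun subs ch => subs ++ (subs.filter (fun t => t.length < 6)).map (fun t => t ++ [ch]))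
          ([[]] : List (List Char))).filter (fun t => 4 ≤ t.length)) := by
  rw [pvB_state, List.filter_filter]
  have hA := PySem.List.foldl_append_if
    (fun i => decide (4 ≤ (pvSub cs i).length ∧ (pvSub cs i).length ≤ 6))
    (pvSub cs) (List.range (1 <<< cs.length)) []
  simp only [decide_eq_true_eq] at hA
  rw [show (fun (sequences : List (List Char)) (i : Nat) =>
        let bib_seq := (List.range cs.length).foldl
          (fun acc j => if i &&& (1 <<< j) != 0 then acc ++ [cs.getD j ' '] else acc) []
        if 4 ≤ bib_seq.length ∧ bib_seq.length ≤ 6 then sequences ++ [bib_seq] else sequences)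
      = (fun sequences i =>
        if 4 ≤ (pvSub cs i).length ∧ (pvSub cs i).length ≤ 6 then sequences ++ [pvSub cs i] else sequences)
      from rfl, hA]
  unfold pvFull
  rw [List.filter_map]
  rw [List.nil_append]
  congr 1
  apply List.filter_congr
  intro i _
  rw [Bool.eq_iff_iff]
  simp only [Function.comp_apply, Bool.and_eq_true, decide_eq_true_eq]

-- ===== VERDICT (by name: the statement is the Claim_ definition above) =====
theorem generate_subsequences_spec : Claim_equal_generate_subsequences := by
  intro bib _
  unfold Spec_generate_subsequences
  simp only [generate_subsequences, generate_subsequences_alt]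
  exact congrArg (List.map String.ofList) (pv_main _)
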